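-- pv_equiv track=rewrite | github.com/YoungHo-K/problem-solving | 프로그래머스/1/155652. 둘만의 암호/둘만의 암호.py | solution
-- ===== SOURCE A (Python) =====
-- def solution(s, skip, index):
--     skip = [ord(val) for val in skip]
--
--     answer = ''
--     for val in s:
--         val = ord(val)
--
--         move = 0
--         while move < index:
--             val += 1
--             if val > 122:   # 'z'
--                 val = 97    # 'a'
--
--             if val in skip:
--                 continue
--
--             move += 1
--
--         answer += chr(val)
--
--     return answer
-- ===== SOURCE B (Python) =====
-- def solution(s, skip, index):
--     skip_ords = {ord(c) for c in skip}
--     cyc = [v for v in range(97, 123) if v not in skip_ords]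
--     res = []
--     for ch in s:
--         if index <= 0:
--             res.append(ch)
--             continue
--         o = ord(ch)
--         prefix = [v for v in range(o + 1, 123) if v not in skip_ords]
--         if index <= len(prefix):
--             res.append(chr(prefix[index - 1]))
--         else:
--             r = index - len(prefix)
--             res.append(chr(cyc[(r - 1) % len(cyc)]))
--     return ''.join(res)
-- ===== Notes on version B (the rewrite author's own statement) =====
-- stated objective: faster
-- what changed: Replaces the per-character step-by-step while loop (index iterations, each scanning skip) by a closed form: the characters still to climb to 'z' are listed once, and the remaining steps are resolved by a modular jump into the precomputed list of non-skipped letters.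
import Mathlib
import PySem

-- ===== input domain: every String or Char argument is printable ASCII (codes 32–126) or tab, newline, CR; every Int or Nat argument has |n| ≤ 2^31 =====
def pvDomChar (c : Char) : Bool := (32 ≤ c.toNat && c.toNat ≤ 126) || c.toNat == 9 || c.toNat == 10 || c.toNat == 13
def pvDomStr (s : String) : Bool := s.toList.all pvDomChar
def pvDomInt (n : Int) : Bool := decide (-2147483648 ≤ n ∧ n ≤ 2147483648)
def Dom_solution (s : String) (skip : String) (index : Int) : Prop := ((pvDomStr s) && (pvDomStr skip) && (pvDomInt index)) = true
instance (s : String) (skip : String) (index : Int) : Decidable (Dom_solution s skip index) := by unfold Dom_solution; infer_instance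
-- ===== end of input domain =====

-- B replaces A's per-character step-by-step while loop by a closed form (climb list + modular jump into the allowed-letter cycle).

-- ===== PORT A =====
-- A's inner 'while move < index' loop; the fuel argument only makes the loop total in Lean
-- (Pre_solution admits exactly the inputs on which Python's loop terminates, and there the fuel is never exhausted).
def solutionLoopA (skipL : List Int) (index : Int) : Nat → Int → Int → Int
  | 0, _, val => val
  | f + 1, move, val =>
    if move < index then
      let v1 := val + 1
      let v2 := if v1 > 122 then 97 else v1
      if v2 ∈ skipL then solutionLoopA skipL index f move v2
      else solutionLoopA skipL index f (move + 1) v2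
    else val

def solution (s : String) (skip : String) (index : Int) : String :=
  let skipL : List Int := skip.toList.map (fun c => (c.toNat : Int))
  let ans := s.toList.foldl
    (fun acc c =>
      let val := solutionLoopA skipL index (26 * index.toNat + 128) 0 ((c.toNat : Int))
      acc ++ [Char.ofNat val.toNat]) []
  String.mk ans

-- ===== PORT B =====
def solution_alt (s : String) (skip : String) (index : Int) : String :=
  let skipOrds : PySem.Set Int := PySem.Set.ofList (skip.toList.map (fun c => (c.toNat : Int)))
  let cyc : List Int := (PySem.List.pyRange 97 123 1).filter (fun v => !(PySem.Set.contains skipOrds v))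
  let res := s.toList.foldl
    (fun acc ch =>
      if index ≤ 0 then acc ++ [ch]
      else
        let o : Int := (ch.toNat : Int)
        let prefx : List Int := (PySem.List.pyRange (o + 1) 123 1).filter (fun v => !(PySem.Set.contains skipOrds v))
        if index ≤ (prefx.length : Int) then
          acc ++ [Char.ofNat ((PySem.List.pyGet? prefx (index - 1)).getD 0).toNat]
        else
          let r := index - (prefx.length : Int)
          acc ++ [Char.ofNat ((PySem.List.pyGet? cyc (PySem.Int.mod (r - 1) (cyc.length : Int))).getD 0).toNat])
    []
  String.mk res

-- ===== PRECONDITION & SPEC =====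
-- Pre_solution is exactly the set of inputs on which A's while loop terminates: either index ≤ 0 (no steps),
-- or some lowercase letter is not skipped (so the wrap-around cycle can absorb the steps), or every character
-- of s finds its index non-skipped steps strictly before wrapping past 'z'. Outside it A diverges (returns nothing).
def Pre_solution (s : String) (skip : String) (index : Int) : Prop :=
  let sk : List Int := skip.toList.map (fun c => (c.toNat : Int))
  index ≤ 0 ∨ (∃ v ∈ PySem.List.pyRange 97 123 1, v ∉ sk) ∨
    ∀ c ∈ s.toList, index ≤ (((PySem.List.pyRange ((c.toNat : Int) + 1) 123 1).filter (fun v => decide (v ∉ sk))).length : Int)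
instance (s : String) (skip : String) (index : Int) : Decidable (Pre_solution s skip index) := by unfold Pre_solution; infer_instance

def pvWitness_solution : String × String × Int := ("hello", "wz", 5)

def Spec_solution (s : String) (skip : String) (index : Int) (out : String) : Prop := out = solution_alt s skip index
instance (s : String) (skip : String) (index : Int) (out : String) : Decidable (Spec_solution s skip index out) := by unfold Spec_solution; infer_instance

-- ===== CLAIM (what is proved, stated in full; the proofs are below) =====
def Claim_equal_solution : Prop := ∀ (s : String) (skip : String) (index : Int), Dom_solution s skip index → Pre_solution s skip index → Spec_solution s skip index (solution s skip index)

-- ===== LEMMAS AND PROOFS =====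

-- proof-side reformulation of A's loop: r = number of moves still to make; consumes fuel exactly as solutionLoopA does
def walkA (skipL : List Int) : Nat → Nat → Int → Int
  | 0, _, v => v
  | _ + 1, 0, v => v
  | f + 1, r + 1, v =>
    let w := if v + 1 > 122 then 97 else v + 1
    if w ∈ skipL then walkA skipL f (r + 1) w else walkA skipL f r w

theorem loopA_eq_walkA (skipL : List Int) (index : Int) :
    ∀ (f : Nat) (m val : Int), solutionLoopA skipL index f m val = walkA skipL f (index - m).toNat val := by
  intro f
  induction f with
  | zero => intro m val; rfl
  | succ f ih =>
    intro m val
    by_cases h : m < index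
    · obtain ⟨t, ht, ht'⟩ : ∃ t : Nat, (index - m).toNat = t + 1 ∧ (index - (m + 1)).toNat = t :=
        ⟨(index - (m + 1)).toNat, by omega, rfl⟩
      rw [ht]
      simp only [solutionLoopA, walkA, if_pos h]
      split_ifs <;> simp [ih, ht, ht']
    · have h0 : (index - m).toNat = 0 := by omega
      rw [h0]
      simp only [solutionLoopA, walkA, if_neg h]

theorem walkA_zero (skipL : List Int) (f : Nat) (v : Int) : walkA skipL f 0 v = v := by
  cases f <;> rfl

-- non-skipped values strictly above v (up to 'z'), in order
def nsAbove (skipL : List Int) (v : Int) : List Int :=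
  (PySem.List.pyRange (v + 1) 123 1).filter (fun x => decide (x ∉ skipL))

theorem nsAbove_step (skipL : List Int) (v : Int) (h : v ≤ 121) :
    nsAbove skipL v = if (v + 1) ∈ skipL then nsAbove skipL (v + 1) else (v + 1) :: nsAbove skipL (v + 1) := by
  unfold nsAbove
  rw [PySem.List.pyRange_one_cons (by omega : v + 1 < 123)]
  simp only [List.filter_cons]
  by_cases hm : (v + 1) ∈ skipL <;> simp [hm]

theorem nsAbove_high (skipL : List Int) (v : Int) (h : 122 ≤ v) : nsAbove skipL v = [] := by
  unfold nsAbove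
  rw [PySem.List.pyRange_one_eq_nil (by omega)]
  rfl

-- the climb: from v ≤ 122, walkA either stops at the r-th non-skipped value above v, or reaches 'z' with
-- r - |nsAbove v| moves left
theorem walkA_climb (skipL : List Int) :
    ∀ (d : Nat) (v : Int) (r f : Nat), v ≤ 122 → (122 - v).toNat = d → d ≤ f → 1 ≤ r →
      walkA skipL f r v =
        (if r ≤ (nsAbove skipL v).length then (nsAbove skipL v).getD (r - 1) 0
         else walkA skipL (f - d) (r - (nsAbove skipL v).length) 122) := by
  intro d
  induction d with
  | zero =>
    intro v r f hv hd hf hr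
    have hv' : v = 122 := by omega
    subst hv'
    rw [nsAbove_high skipL 122 le_rfl]
    simp only [List.length_nil]
    rw [if_neg (by omega)]
    simp
  | succ d ih =>
    intro v r f hv hd hf hr
    have hv' : v ≤ 121 := by omega
    obtain ⟨f', rfl⟩ : ∃ f', f = f' + 1 := ⟨f - 1, by omega⟩
    obtain ⟨r', rfl⟩ : ∃ r', r = r' + 1 := ⟨r - 1, by omega⟩
    have hw : ¬ (v + 1 > 122) := by omega
    rw [nsAbove_step skipL v hv']
    by_cases hm : (v + 1) ∈ skipL
    · simp only [walkA, if_neg hw, if_pos hm]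
      rw [ih (v + 1) (r' + 1) f' (by omega) (by omega) (by omega) (by omega)]
      have he : f' + 1 - (d + 1) = f' - d := by omega
      rw [he]
    · simp only [walkA, if_neg hw, if_neg hm]
      simp only [List.length_cons]
      rcases Nat.eq_zero_or_pos r' with hr0 | hr1
      · subst hr0
        rw [walkA_zero]
        rw [if_pos (by omega)]
        simp
      · rw [ih (v + 1) r' f' (by omega) (by omega) (by omega) hr1]
        by_cases hle : r' ≤ (nsAbove skipL (v + 1)).length
        · rw [if_pos hle, if_pos (by omega)]
          simp only [Nat.add_sub_cancel]
          obtain ⟨r'', rfl⟩ : ∃ r'', r' = r'' + 1 := ⟨r' - 1, by omega⟩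
          simp
        · rw [if_neg hle, if_neg (by omega)]
          have h1 : r' + 1 - ((nsAbove skipL (v + 1)).length + 1) = r' - (nsAbove skipL (v + 1)).length := by omega
          have h2 : f' + 1 - (d + 1) = f' - d := by omega
          rw [h1, h2]

-- from 'z' or beyond, the first step wraps to 'a' = 97 — the same first value the walk from 96 computes
theorem walkA_wrap (skipL : List Int) (f r : Nat) (v : Int) (hv : 122 ≤ v) :
    walkA skipL (f + 1) (r + 1) v = walkA skipL (f + 1) (r + 1) 96 := by
  have h1 : v + 1 > 122 := by omega
  simp only [walkA]
  norm_num [h1]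

-- the cycle: from just below 'a', r ≥ 1 remaining moves land on the ((r-1) mod k)-th allowed letter
theorem walkA_cycle (skipL : List Int) (hk : 0 < (nsAbove skipL 96).length) :
    ∀ (r : Nat), 1 ≤ r → ∀ (f : Nat), 26 * r ≤ f →
      walkA skipL f r 96 = (nsAbove skipL 96).getD ((r - 1) % (nsAbove skipL 96).length) 0 := by
  intro r
  induction r using Nat.strong_induction_on with
  | _ r ih =>
    intro hr f hf
    rw [walkA_climb skipL 26 96 r f (by norm_num) (by decide) (by omega) hr]
    set k := (nsAbove skipL 96).length with hkdef
    by_cases hle : r ≤ k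
    · rw [if_pos hle, Nat.mod_eq_of_lt (by omega)]
    · rw [if_neg hle]
      obtain ⟨f', hf'⟩ : ∃ f', f - 26 = f' + 1 := ⟨f - 27, by omega⟩
      obtain ⟨r', hr'⟩ : ∃ r', r - k = r' + 1 := ⟨r - k - 1, by omega⟩
      rw [hf', hr', walkA_wrap skipL f' r' 122 le_rfl, ← hf', ← hr']
      rw [ih (r - k) (by omega) (by omega) (f - 26) (by omega)]
      have hmod : (r - k - 1) % k = (r - 1) % k := by
        have h1 : (r - 1) % k = (r - 1 - k) % k := Nat.mod_eq_sub_mod (by omega)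
        have h2 : r - 1 - k = r - k - 1 := by omega
        rw [h1, h2]
      rw [hmod]

-- cycle non-empty from Pre_'s second disjunct
theorem cyc_pos (skipL : List Int) (h : ∃ v ∈ PySem.List.pyRange 97 123 1, v ∉ skipL) :
    0 < (nsAbove skipL 96).length := by
  obtain ⟨v, hv, hn⟩ := h
  have hm : v ∈ nsAbove skipL 96 := by
    unfold nsAbove
    rw [List.mem_filter]
    exact ⟨by norm_num at hv ⊢; exact hv, by simpa using hn⟩
  exact List.length_pos_of_mem hm

-- per-character agreement under Pre_'s guarantees
theorem char_agree (skipL : List Int) (index : Int) (c : Char)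
    (hok : index ≤ 0 ∨ 0 < (nsAbove skipL 96).length ∨ index ≤ ((nsAbove skipL ((c.toNat : Int))).length : Int)) :
    Char.ofNat (solutionLoopA skipL index (26 * index.toNat + 128) 0 ((c.toNat : Int))).toNat =
      (if index ≤ 0 then c
       else if index ≤ (((nsAbove skipL ((c.toNat : Int)))).length : Int) then
         Char.ofNat ((PySem.List.pyGet? (nsAbove skipL ((c.toNat : Int))) (index - 1)).getD 0).toNat
       else
         Char.ofNat ((PySem.List.pyGet? (nsAbove skipL 96)
           (PySem.Int.mod ((index - ((nsAbove skipL ((c.toNat : Int))).length : Int)) - 1)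
             ((nsAbove skipL 96).length : Int))).getD 0).toNat) := by
  set o : Int := (c.toNat : Int) with ho'
  have ho : 0 ≤ o := by positivity
  by_cases hi : index ≤ 0
  · rw [if_pos hi]
    obtain ⟨f', hf'⟩ : ∃ f', 26 * index.toNat + 128 = f' + 1 := ⟨26 * index.toNat + 127, by omega⟩
    rw [hf']
    simp only [solutionLoopA, if_neg (by omega : ¬ (0 : Int) < index)]
    simp [ho']
  · rw [if_neg hi]
    have hr1 : 1 ≤ index.toNat := by omega
    set r : Nat := index.toNat with hrdef
    have hir : index = (r : Int) := by omega
    have hL : solutionLoopA skipL index (26 * r + 128) 0 o = walkA skipL (26 * r + 128) r o := by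
      rw [loopA_eq_walkA skipL index (26 * r + 128) 0 o]
      congr 1
      omega
    rw [hL]
    have hcyc : index ≤ ((nsAbove skipL o).length : Int) ∨ 0 < (nsAbove skipL 96).length := by
      rcases hok with h | h | h
      · omega
      · exact Or.inr h
      · exact Or.inl h
    by_cases ho122 : o ≤ 122
    · rw [walkA_climb skipL (122 - o).toNat o r (26 * r + 128) ho122 rfl (by omega) hr1]
      by_cases hle : r ≤ (nsAbove skipL o).length
      · rw [if_pos hle, if_pos (by omega : index ≤ ((nsAbove skipL o).length : Int))]
        have h1 : index - 1 = ((r - 1 : Nat) : Int) := by omega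
        rw [h1, PySem.List.pyGet?_natCast, List.getD_eq_getElem?_getD]
      · rw [if_neg hle, if_neg (by omega : ¬ index ≤ ((nsAbove skipL o).length : Int))]
        have hk : 0 < (nsAbove skipL 96).length := by
          rcases hcyc with h | h
          · omega
          · exact h
        set p : Nat := (nsAbove skipL o).length with hpdef
        obtain ⟨f', hf'⟩ : ∃ f', 26 * r + 128 - (122 - o).toNat = f' + 1 := ⟨26 * r + 128 - (122 - o).toNat - 1, by omega⟩
        obtain ⟨r', hr'⟩ : ∃ r', r - p = r' + 1 := ⟨r - p - 1, by omega⟩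
        rw [hf', hr', walkA_wrap skipL f' r' 122 le_rfl, ← hf', ← hr']
        rw [walkA_cycle skipL hk (r - p) (by omega) (26 * r + 128 - (122 - o).toNat) (by omega)]
        have h1 : index - (p : Int) - 1 = ((r - p - 1 : Nat) : Int) := by omega
        rw [h1, PySem.Int.mod_natCast, PySem.List.pyGet?_natCast, List.getD_eq_getElem?_getD]
    · have hnil : nsAbove skipL o = [] := nsAbove_high skipL o (by omega)
      rw [hnil]
      simp only [List.length_nil, Nat.cast_zero]
      rw [if_neg (by omega : ¬ index ≤ (0 : Int))]
      have hk : 0 < (nsAbove skipL 96).length := by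
        rcases hcyc with h | h
        · rw [hnil] at h; simp at h; omega
        · exact h
      obtain ⟨f', hf'⟩ : ∃ f', 26 * r + 128 = f' + 1 := ⟨26 * r + 127, by omega⟩
      obtain ⟨r', hr'⟩ : ∃ r', r = r' + 1 := ⟨r - 1, by omega⟩
      rw [hf', hr', walkA_wrap skipL f' r' o (by omega), ← hf', ← hr']
      rw [walkA_cycle skipL hk r hr1 (26 * r + 128) (by omega)]
      have h1 : index - 0 - 1 = ((r - 1 : Nat) : Int) := by omega
      rw [h1, PySem.Int.mod_natCast, PySem.List.pyGet?_natCast, List.getD_eq_getElem?_getD]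

-- B's set-membership filters compute nsAbove
theorem filter_set_eq_nsAbove (skipL : List Int) (v : Int) :
    ((PySem.List.pyRange (v + 1) 123 1).filter (fun x => !(PySem.Set.contains (PySem.Set.ofList skipL) x))) =
      nsAbove skipL v := by
  unfold nsAbove
  apply List.filter_congr
  intro x _
  simp [PySem.Set.contains, PySem.Set.mem_ofList]

-- ===== VERDICT (by name: the statement is the Claim_ definition above) =====
theorem solution_spec : Claim_equal_solution := by
  intro s skip index hdom hpre
  unfold Spec_solution
  simp only [solution, solution_alt]
  have h97 : (97 : Int) = 96 + 1 := by norm_num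
  rw [h97, filter_set_eq_nsAbove]
  have hfun : ∀ c : Char,
      ((PySem.List.pyRange ((c.toNat : Int) + 1) 123 1).filter
        (fun x => !(PySem.Set.contains (PySem.Set.ofList (skip.toList.map (fun c => (c.toNat : Int)))) x))) =
        nsAbove (skip.toList.map (fun c => (c.toNat : Int))) ((c.toNat : Int)) :=
    fun c => filter_set_eq_nsAbove _ _
  simp only [hfun]
  rw [show (fun (acc : List Char) (ch : Char) =>
        if index ≤ 0 then acc ++ [ch]
        else
          if index ≤ ((nsAbove (skip.toList.map (fun c => (c.toNat : Int))) ((ch.toNat : Int))).length : Int) then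
            acc ++ [Char.ofNat ((PySem.List.pyGet? (nsAbove (skip.toList.map (fun c => (c.toNat : Int))) ((ch.toNat : Int))) (index - 1)).getD 0).toNat]
          else
            acc ++ [Char.ofNat ((PySem.List.pyGet? (nsAbove (skip.toList.map (fun c => (c.toNat : Int))) 96)
              (PySem.Int.mod ((index - ((nsAbove (skip.toList.map (fun c => (c.toNat : Int))) ((ch.toNat : Int))).length : Int)) - 1)
                ((nsAbove (skip.toList.map (fun c => (c.toNat : Int))) 96).length : Int))).getD 0).toNat]) =
      (fun (acc : List Char) (ch : Char) => acc ++
        [if index ≤ 0 then ch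
         else if index ≤ ((nsAbove (skip.toList.map (fun c => (c.toNat : Int))) ((ch.toNat : Int))).length : Int) then
           Char.ofNat ((PySem.List.pyGet? (nsAbove (skip.toList.map (fun c => (c.toNat : Int))) ((ch.toNat : Int))) (index - 1)).getD 0).toNat
         else
           Char.ofNat ((PySem.List.pyGet? (nsAbove (skip.toList.map (fun c => (c.toNat : Int))) 96)
             (PySem.Int.mod ((index - ((nsAbove (skip.toList.map (fun c => (c.toNat : Int))) ((ch.toNat : Int))).length : Int)) - 1)
               ((nsAbove (skip.toList.map (fun c => (c.toNat : Int))) 96).length : Int))).getD 0).toNat])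
      from by funext acc ch; split_ifs <;> rfl]
  rw [PySem.List.foldl_append_singleton_eq_map, PySem.List.foldl_append_singleton_eq_map]
  simp only [List.nil_append]
  congr 1
  apply List.map_congr_left
  intro c hc
  apply char_agree
  unfold Pre_solution at hpre
  simp only at hpre
  rcases hpre with h | h | h
  · exact Or.inl h
  · exact Or.inr (Or.inl (cyc_pos _ h))
  · refine Or.inr (Or.inr ?_)
    have := h c hc
    unfold nsAbove
    exact this
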